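-- pv_equiv track=rewrite | github.com/shivamkalra123/Leetcode | Favorite-Catalan Number.py | generate_chords
-- ===== SOURCE A (Python) =====
-- def generate_chords(n):
--     def helper(points):
--         if not points:  # No points left, return a trivial configuration
--             return [[]]
--
--         results = []
--         for i in range(1, len(points), 2):  # Choose a pair of points for the first chord
--             left = points[1:i]  # Points inside the chord
--             right = points[i+1:]  # Points outside the chord
--
--             # Recursive generation of all subproblems
--             left_chords = helper(left)
--             right_chords = helper(right)
--
--             # Combine left and right subproblem solutions
--             for l in left_chords:
--                 for r in right_chords:
--                     results.append([(points[0], points[i])] + l + r)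
--
--         return results
--
--     # Start with all points (2n points labeled 1, 2, ..., 2n)
--     points = list(range(1, 2*n + 1))
--     return helper(points)
-- ===== SOURCE B (Python) =====
-- def generate_chords(n):
--     # Bottom-up DP: tbl[k] holds all non-crossing pairings of 2k points as
--     # 0-based index shapes; one substitution pass relabels indices to 1..2n.
--     halves = n if n > 0 else 0
--     tbl = [[[]]]
--     for k in range(1, halves + 1):
--         res = []
--         for j in range(k):
--             i = 2 * j + 1                      # first chord is (0, i)
--             for l in tbl[j]:
--                 for r in tbl[k - 1 - j]:
--                     res.append([(0, i)]
--                                + [(a + 1, b + 1) for (a, b) in l]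
--                                + [(a + i + 1, b + i + 1) for (a, b) in r])
--         tbl.append(res)
--     return [[(a + 1, b + 1) for (a, b) in shape] for shape in tbl[halves]]
-- ===== Notes on version B (the rewrite author's own statement) =====
-- stated objective: alternative
-- what changed: Replaces A's top-down recursion that re-solves every sub-interval from scratch with a bottom-up table of zero-based index shapes (one entry per even size) plus a single relabelling pass, preserving the exact enumeration order.
import Mathlib
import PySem

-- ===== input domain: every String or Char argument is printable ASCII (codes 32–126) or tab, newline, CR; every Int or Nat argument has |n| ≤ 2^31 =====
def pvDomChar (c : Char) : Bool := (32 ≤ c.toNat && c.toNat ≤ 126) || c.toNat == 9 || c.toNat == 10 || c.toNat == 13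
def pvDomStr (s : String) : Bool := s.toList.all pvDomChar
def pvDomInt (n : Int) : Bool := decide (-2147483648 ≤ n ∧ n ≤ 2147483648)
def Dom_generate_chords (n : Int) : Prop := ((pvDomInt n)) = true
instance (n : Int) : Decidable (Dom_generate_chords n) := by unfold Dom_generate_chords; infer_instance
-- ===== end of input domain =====

-- B replaces A's top-down recursion (which re-solves each sub-interval from scratch)
-- by a bottom-up table of 0-based index shapes plus one relabelling pass (objective: alternative).

-- ===== PORT A =====
-- helper(points): pyGetD is exact here because the loop only reads indices 0 and i with 1 ≤ i < len(points).
def pvHelperA (ps : List Int) : List (List (Int × Int)) :=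
  if _h : ps = [] then [[]]
  else
    (PySem.List.pyRange 1 (ps.length : Int) 2).attach.flatMap (fun ⟨i, hi⟩ =>
      (pvHelperA (PySem.List.slice ps (some 1) (some i))).flatMap (fun l =>
        (pvHelperA (PySem.List.slice ps (some (i + 1)) none)).map (fun r =>
          (PySem.List.pyGetD ps 0 0, PySem.List.pyGetD ps i 0) :: l ++ r)))
termination_by ps.length
decreasing_by
  all_goals
    have h1 := (PySem.List.mem_pyRange_iff_of_pos (by omega : (0:Int) < 2) i).mp hi
    have hlen : ps.length ≠ 0 := fun h => _h (List.eq_nil_of_length_eq_zero h)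
    first
    | (rw [PySem.List.slice_toNat ps (by omega) (by omega)]
       simp only [List.length_take, List.length_drop]
       omega)
    | (rw [PySem.List.slice_from ps (by omega)]
       simp only [List.length_drop]
       omega)

def generate_chords (n : Int) : List (List (Int × Int)) :=
  pvHelperA (PySem.List.pyRange 1 (2 * n + 1) 1)

-- ===== PORT B =====
-- one pass of Source B's outer loop: append the shape list for 2*k points to the table
def pvGcStep (tbl : List (List (List (Int × Int)))) (k : Nat) : List (List (List (Int × Int))) :=
  tbl ++ [(List.range k).flatMap (fun j =>
    (tbl.getD j []).flatMap (fun l =>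
      (tbl.getD (k - 1 - j) []).map (fun r =>
        ((0 : Int), (2 * (j : Int) + 1)) ::
          l.map (fun p => (p.1 + 1, p.2 + 1)) ++
          r.map (fun p => (p.1 + (2 * (j : Int) + 2), p.2 + (2 * (j : Int) + 2))))))]

def generate_chords_alt (n : Int) : List (List (Int × Int)) :=
  let halves := (if 0 < n then n else 0).toNat
  let tbl := (List.range' 1 halves).foldl pvGcStep [[[]]]
  (tbl.getD halves []).map (fun shape => shape.map (fun p => (p.1 + 1, p.2 + 1)))

-- ===== PRECONDITION & SPEC =====
def Spec_generate_chords (n : Int) (out : List (List (Int × Int))) : Prop := out = generate_chords_alt n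
instance (n : Int) (out : List (List (Int × Int))) : Decidable (Spec_generate_chords n out) := by unfold Spec_generate_chords; infer_instance

-- ===== CLAIM (what is proved, stated in full; the proofs are below) =====
def Claim_equal_generate_chords : Prop := ∀ (n : Int), Dom_generate_chords n → Spec_generate_chords n (generate_chords n)

-- ===== LEMMAS AND PROOFS =====

-- the family of 0-based index shapes for 2k points (mathematical form of B's table entries)
def pvPat : Nat → List (List (Int × Int))
  | 0 => [[]]
  | (k + 1) => (List.range (k + 1)).attach.flatMap (fun ⟨j, _hj⟩ =>
      (pvPat j).flatMap (fun l =>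
        (pvPat (k - j)).map (fun r =>
          ((0 : Int), (2 * (j : Int) + 1)) ::
            l.map (fun p => (p.1 + 1, p.2 + 1)) ++
            r.map (fun p => (p.1 + (2 * (j : Int) + 2), p.2 + (2 * (j : Int) + 2))))))
termination_by k => k
decreasing_by
  all_goals (have := List.mem_range.mp _hj; omega)

lemma pvPat_succ (k : Nat) : pvPat (k + 1) = (List.range (k + 1)).flatMap (fun j =>
    (pvPat j).flatMap (fun l =>
      (pvPat (k - j)).map (fun r =>
        ((0 : Int), (2 * (j : Int) + 1)) ::
          l.map (fun p => (p.1 + 1, p.2 + 1)) ++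
          r.map (fun p => (p.1 + (2 * (j : Int) + 2), p.2 + (2 * (j : Int) + 2)))))) := by
  rw [pvPat]; simp [List.flatMap_eq_foldl]

-- the consecutive-integer point list [c, c+1, …, c+m-1]
def pvPts (c : Int) (m : Nat) : List Int := (List.range m).map (fun (t : Nat) => c + (t : Int))

lemma pvPts_length (c : Int) (m : Nat) : (pvPts c m).length = m := by
  simp [pvPts]

lemma pvPts_zero (c : Int) : pvPts c 0 = [] := rfl

lemma pvPts_succ (c : Int) (m : Nat) : pvPts c (m + 1) = c :: pvPts (c + 1) m := by
  unfold pvPts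
  rw [List.range_succ_eq_map, List.map_cons, List.map_map]
  congr 1
  · simp
  · apply List.map_congr_left; intro a _; simp [Function.comp]; ring

lemma pvPts_drop (c : Int) (m d : Nat) : (pvPts c m).drop d = pvPts (c + d) (m - d) := by
  induction d generalizing c m with
  | zero => simp
  | succ d IH =>
    cases m with
    | zero => simp [pvPts_zero]
    | succ m =>
      rw [pvPts_succ, List.drop_succ_cons, IH]
      congr 1 <;> [push_cast; skip] <;> omega

lemma pvPts_take (c : Int) (m t : Nat) : (pvPts c m).take t = pvPts c (min t m) := by
  induction t generalizing c m with
  | zero => simp [pvPts_zero]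
  | succ t IH =>
    cases m with
    | zero => simp [pvPts_zero]
    | succ m =>
      rw [pvPts_succ, List.take_succ_cons, IH, Nat.succ_min_succ, pvPts_succ]

lemma pvPts_getD (c : Int) (m t : Nat) (h : t < m) : (pvPts c m).getD t 0 = c + t := by
  induction m generalizing c t with
  | zero => omega
  | succ m IH =>
    rw [pvPts_succ]
    cases t with
    | zero => simp
    | succ t => rw [List.getD_cons_succ, IH _ _ (by omega)]; push_cast; ring

lemma pvPts_get (c : Int) (m : Nat) (i : Int) (h0 : 0 ≤ i) (h1 : i < (m : Int)) :
    PySem.List.pyGetD (pvPts c m) i 0 = c + i := by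
  rw [PySem.List.pyGetD_of_nonneg _ _ h0, pvPts_getD c m i.toNat (by omega)]
  congr 1
  omega

lemma pvHelperA_ne (ps : List Int) (h : ps ≠ []) :
    pvHelperA ps = (PySem.List.pyRange 1 (ps.length : Int) 2).flatMap (fun i =>
      (pvHelperA (PySem.List.slice ps (some 1) (some i))).flatMap (fun l =>
        (pvHelperA (PySem.List.slice ps (some (i + 1)) none)).map (fun r =>
          (PySem.List.pyGetD ps 0 0, PySem.List.pyGetD ps i 0) :: l ++ r))) := by
  rw [pvHelperA, dif_neg h]
  simp [List.flatMap_eq_foldl]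

lemma pvHelperA_pts (k : Nat) (c : Int) :
    pvHelperA (pvPts c (2 * k)) = (pvPat k).map (fun sh => sh.map (fun p => (p.1 + c, p.2 + c))) := by
  induction k using Nat.strong_induction_on generalizing c with
  | _ k IH =>
    match k with
    | 0 => rw [pvHelperA]; simp [pvPts, pvPat]
    | (k' + 1) =>
      have hne : pvPts c (2 * (k' + 1)) ≠ [] := by
        simp [pvPts, List.map_eq_nil_iff, List.range_eq_nil]
      rw [pvHelperA_ne _ hne, pvPat_succ, pvPts_length]
      have hrange : PySem.List.pyRange 1 ((2 * (k' + 1) : Nat) : Int) 2 =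
          (List.range (k' + 1)).map (fun (j : Nat) => (1 : Int) + 2 * (j : Int)) := by
        rw [PySem.List.pyRange_of_pos 1 _ (by omega)]
        rw [if_pos (by push_cast; omega)]
        exact congrArg (List.map _) (congrArg List.range (by push_cast; omega))
      rw [hrange, List.flatMap_map, List.map_flatMap]
      apply List.flatMap_congr
      intro j hj
      have hjlt : j < k' + 1 := List.mem_range.mp hj
      try simp only [Function.comp]
      have hleft : PySem.List.slice (pvPts c (2 * (k' + 1))) (some 1) (some ((1 : Int) + 2 * j)) =
          pvPts (c + 1) (2 * j) := by
        rw [PySem.List.slice_toNat _ (by omega) (by omega), pvPts_drop, pvPts_take]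
        have h1 : ((1 : Int) + 2 * (j : Int)).toNat = 1 + 2 * j := by omega
        have h2 : (1 : Int).toNat = 1 := rfl
        rw [h1, h2]
        congr 1 <;> omega
      have hright : PySem.List.slice (pvPts c (2 * (k' + 1))) (some ((1 : Int) + 2 * j + 1)) none =
          pvPts (c + 2 * j + 2) (2 * (k' - j)) := by
        rw [PySem.List.slice_from _ (by omega), pvPts_drop]
        have h1 : ((1 : Int) + 2 * (j : Int) + 1).toNat = 2 * j + 2 := by omega
        rw [h1]
        congr 1
        · push_cast; ring
        · omega
      rw [hleft, hright, IH j (by omega) (c + 1), IH (k' - j) (by omega) (c + 2 * j + 2)]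
      rw [List.flatMap_map, List.map_flatMap]
      apply List.flatMap_congr
      intro l _
      try simp only [Function.comp]
      simp only [List.map_map]
      apply List.map_congr_left
      intro r _
      have h0 : PySem.List.pyGetD (pvPts c (2 * (k' + 1))) 0 0 = c := by
        rw [pvPts_get _ _ _ (le_refl 0) (by push_cast; omega)]; ring
      have hi : PySem.List.pyGetD (pvPts c (2 * (k' + 1))) ((1 : Int) + 2 * j) 0 = c + (1 + 2 * j) := by
        rw [pvPts_get _ _ _ (by omega) (by push_cast; omega)]
      rw [h0, hi]
      simp only [Function.comp_apply, List.map_cons, List.map_append, List.map_map]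
      congr 1
      · congr 1
        · simp only [Prod.mk.injEq]; exact ⟨by ring, by ring⟩
        · apply List.map_congr_left; intro p _
          simp only [Function.comp_apply, Prod.mk.injEq]; exact ⟨by ring, by ring⟩
      · apply List.map_congr_left; intro p _
        simp only [Function.comp_apply, Prod.mk.injEq]; exact ⟨by ring, by ring⟩

lemma pvTbl_eq (h : Nat) :
    (List.range' 1 h).foldl pvGcStep [[[]]] = (List.range (h + 1)).map pvPat := by
  induction h with
  | zero => simp [pvPat]
  | succ h IH =>
    rw [List.range'_1_concat, List.foldl_append, IH, List.foldl_cons, List.foldl_nil]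
    have hnew : pvGcStep ((List.range (h + 1)).map pvPat) (1 + h) =
        (List.range (h + 1)).map pvPat ++ [pvPat (h + 1)] := by
      rw [pvGcStep]
      congr 1
      congr 1
      rw [pvPat_succ, show 1 + h = h + 1 by omega]
      apply List.flatMap_congr
      intro j hj
      have hjlt : j < h + 1 := List.mem_range.mp hj
      rw [PySem.List.getD_map_range pvPat (h + 1) j [] (by omega),
          PySem.List.getD_map_range pvPat (h + 1) (h + 1 - 1 - j) [] (by omega),
          show h + 1 - 1 - j = h - j by omega]
    rw [hnew]
    conv_rhs => rw [List.range_succ]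
    rw [List.map_append, List.map_singleton]

lemma pvAlt_eq (n : Int) :
    generate_chords_alt n = (pvPat (if 0 < n then n else 0).toNat).map
      (fun sh => sh.map (fun p => (p.1 + 1, p.2 + 1))) := by
  show (((List.range' 1 ((if 0 < n then n else 0).toNat)).foldl pvGcStep [[[]]]).getD
      ((if 0 < n then n else 0).toNat) []).map (fun shape => shape.map (fun p => (p.1 + 1, p.2 + 1))) = _
  rw [pvTbl_eq, PySem.List.getD_map_range pvPat _ _ [] (by omega)]

-- ===== VERDICT (by name: the statement is the Claim_ definition above) =====
theorem generate_chords_spec : Claim_equal_generate_chords := by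
  intro n _
  unfold Spec_generate_chords
  rw [pvAlt_eq]
  unfold generate_chords
  have hpts : PySem.List.pyRange 1 (2 * n + 1) 1 = pvPts 1 (2 * (if 0 < n then n else 0).toNat) := by
    rw [PySem.List.pyRange_one]
    unfold pvPts
    exact congrArg (List.map _) (congrArg List.range (by split_ifs with hn <;> omega))
  rw [hpts, pvHelperA_pts]
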